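-- pv_equiv track=rewrite | github.com/SauravSinha76/scaler | class11/special_index.py | solve
-- ===== SOURCE A (Python) =====
-- def solve(A):
--     n = len(A)
--     count =0
--     if n < 2:
--         return count
--     peven = [0] * n
--     podd = [0] * n
--
--     peven[0] = A[0]
--     podd[1] = A[1]
--
--     for i in range(1, n):
--         if i % 2 == 0:
--             peven[i] = A[i] +peven[i - 1]
--             podd[i] = podd[i - 1]
--         else:
--             peven[i] = peven[i-1]
--             podd[i] = A[i] + podd[i - 1]
--
--
--     for i in range(n):
--
--         sum_even = podd[n - 1] - podd[i]
--         if i != 0: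
--             sum_even += peven[i - 1]
--
--         sum_odd = peven[n - 1] - peven[i]
--         if i != 0:
--             sum_odd += podd[i - 1]
--
--         if sum_odd == sum_even:
--             count += 1
--     return count
-- ===== SOURCE B (Python) =====
-- def solve(A):
--     if len(A) < 2:
--         return 0
--     # Signed reformulation: with sign s_j = +1 for even j, -1 for odd j,
--     # removing index i balances the array iff 2*P_i + s_i*A[i] == T,
--     # where P_i is the signed sum of A[:i] and T the signed sum of all of A.
--     T = 0
--     s = 1
--     for x in A:
--         T += s * x
--         s = -s
--     count = 0
--     P = 0
--     s = 1
--     for x in A: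
--         if 2 * P + s * x == T:
--             count += 1
--         P += s * x
--         s = -s
--     return count
-- ===== Notes on version B (the rewrite author's own statement) =====
-- stated objective: simpler
-- what changed: B replaces A's two even/odd prefix-sum arrays and per-index suffix bookkeeping with a single signed (alternating) running sum: index i is special iff 2*P + s*A[i] == T where P is the signed prefix sum, s the index sign and T the total signed sum, so the whole computation is two element loops over three scalars with no arrays and no index arithmetic.
import Mathlib
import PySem

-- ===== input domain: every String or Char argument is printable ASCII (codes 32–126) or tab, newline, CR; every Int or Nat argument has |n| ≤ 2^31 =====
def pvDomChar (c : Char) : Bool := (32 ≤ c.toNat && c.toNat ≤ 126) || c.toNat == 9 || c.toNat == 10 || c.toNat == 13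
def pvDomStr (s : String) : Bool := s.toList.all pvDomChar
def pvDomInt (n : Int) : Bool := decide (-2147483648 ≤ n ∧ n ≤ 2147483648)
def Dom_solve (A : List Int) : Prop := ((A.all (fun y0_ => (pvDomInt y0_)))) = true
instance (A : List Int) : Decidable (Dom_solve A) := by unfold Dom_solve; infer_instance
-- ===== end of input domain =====

-- B replaces A's even/odd prefix-sum arrays with a single signed (alternating) running
-- sum and the scalar test 2*P + s*A[i] == T (simpler: no arrays, no index arithmetic).

-- ===== PORT A =====
-- body of A's first 'for i in range(1, n)' loop (mutating peven, podd)
def solveStep1 (A : List Int) (st : List Int × List Int) (i : Int) : List Int × List Int :=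
  if PySem.Int.mod i 2 = 0 then
    (PySem.List.pySetD st.1 i (PySem.List.pyGetD A i 0 + PySem.List.pyGetD st.1 (i - 1) 0),
     PySem.List.pySetD st.2 i (PySem.List.pyGetD st.2 (i - 1) 0))
  else
    (PySem.List.pySetD st.1 i (PySem.List.pyGetD st.1 (i - 1) 0),
     PySem.List.pySetD st.2 i (PySem.List.pyGetD A i 0 + PySem.List.pyGetD st.2 (i - 1) 0))

-- body of A's second 'for i in range(n)' loop (accumulating count)
def solveStep2 (peven podd : List Int) (n : Int) (count : Int) (i : Int) : Int :=
  let sum_even := PySem.List.pyGetD podd (n - 1) 0 - PySem.List.pyGetD podd i 0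
  let sum_even := if i ≠ 0 then sum_even + PySem.List.pyGetD peven (i - 1) 0 else sum_even
  let sum_odd := PySem.List.pyGetD peven (n - 1) 0 - PySem.List.pyGetD peven i 0
  let sum_odd := if i ≠ 0 then sum_odd + PySem.List.pyGetD podd (i - 1) 0 else sum_odd
  if sum_odd = sum_even then count + 1 else count

def solve (A : List Int) : Int :=
  let n : Int := PySem.List.len A
  let count : Int := 0
  if n < 2 then count
  else
    let peven := List.replicate n.toNat (0 : Int)
    let podd := List.replicate n.toNat (0 : Int)
    let peven := PySem.List.pySetD peven 0 (PySem.List.pyGetD A 0 0)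
    let podd := PySem.List.pySetD podd 1 (PySem.List.pyGetD A 1 0)
    let st := (PySem.List.pyRange 1 n 1).foldl (solveStep1 A) (peven, podd)
    (PySem.List.pyRange 0 n 1).foldl (solveStep2 st.1 st.2 n) count

-- ===== PORT B =====
-- body of B's total loop: state (T, s), per element x: T += s*x; s = -s
def altStepT (st : Int × Int) (x : Int) : Int × Int := (st.1 + st.2 * x, -st.2)

-- body of B's counting loop: state (count, P, s)
def altStepC (T : Int) (st : Int × Int × Int) (x : Int) : Int × Int × Int :=
  let c := if 2 * st.2.1 + st.2.2 * x = T then st.1 + 1 else st.1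
  (c, st.2.1 + st.2.2 * x, -st.2.2)

def solve_alt (A : List Int) : Int :=
  if PySem.List.len A < 2 then 0
  else
    let T := (A.foldl altStepT (0, 1)).1
    (A.foldl (altStepC T) (0, 0, 1)).1

-- ===== PRECONDITION & SPEC =====
def Spec_solve (A : List Int) (out : Int) : Prop := out = solve_alt A
instance (A : List Int) (out : Int) : Decidable (Spec_solve A out) := by unfold Spec_solve; infer_instance

-- ===== CLAIM (what is proved, stated in full; the proofs are below) =====
def Claim_equal_solve : Prop := ∀ (A : List Int), Dom_solve A → Spec_solve A (solve A)

-- ===== LEMMAS AND PROOFS =====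
-- Epre A k / Opre A k : sum of A[j] for j < k with j even / odd.
def Epre (A : List Int) (k : Nat) : Int :=
  ((List.range k).map (fun j => if j % 2 = 0 then A.getD j 0 else 0)).sum
def Opre (A : List Int) (k : Nat) : Int :=
  ((List.range k).map (fun j => if j % 2 = 0 then 0 else A.getD j 0)).sum

-- index sign: +1 for even positions, -1 for odd
def sgn (k : Nat) : Int := if k % 2 = 0 then 1 else -1

theorem Epre_succ (A : List Int) (k : Nat) :
    Epre A (k + 1) = Epre A k + (if k % 2 = 0 then A.getD k 0 else 0) := by
  simp [Epre, List.range_succ]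

theorem Opre_succ (A : List Int) (k : Nat) :
    Opre A (k + 1) = Opre A k + (if k % 2 = 0 then 0 else A.getD k 0) := by
  simp [Opre, List.range_succ]

theorem castRange (n : Nat) :
    PySem.List.pyRange 0 (n : Int) 1 = (List.range n).map (fun (k : Nat) => (k : Int)) := by
  simp [PySem.List.pyRange_one]

theorem Epre_zero (A : List Int) : Epre A 0 = 0 := by simp [Epre]
theorem Opre_zero (A : List Int) : Opre A 0 = 0 := by simp [Opre]

-- predicate of A's second loop at index k, in Epre/Opre terms
def Qa (A : List Int) (k : Nat) : Bool :=
  decide (Epre A A.length - Epre A (k + 1) + (if k ≠ 0 then Opre A k else 0)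
        = Opre A A.length - Opre A (k + 1) + (if k ≠ 0 then Epre A k else 0))

-- predicate of B's counting loop at index k
def Qs (A : List Int) (T : Int) (k : Nat) : Bool :=
  decide (2 * (Epre A k - Opre A k) + sgn k * A.getD k 0 = T)

theorem Qa_eq_Qs (A : List Int) (k : Nat) :
    Qa A k = Qs A (Epre A A.length - Opre A A.length) k := by
  by_cases hk : k % 2 = 0 <;> by_cases h0 : k = 0 <;>
    simp only [Qa, Qs, sgn, hk, h0, Epre_succ, Opre_succ, if_pos, if_neg,
      Epre_zero, Opre_zero, ne_eq, not_true_eq_false, not_false_eq_true, decide_eq_decide] <;>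
    simp <;> omega

theorem sgn_succ (k : Nat) : sgn (k + 1) = -sgn k := by
  rcases Nat.even_or_odd k with hp | hp
  · simp [sgn, Nat.even_iff.mp hp, Nat.add_mod]
  · simp [sgn, Nat.odd_iff.mp hp, Nat.add_mod]

theorem sgn_sum (A : List Int) (k : Nat) :
    Epre A k - Opre A k + sgn k * A.getD k 0 = Epre A (k + 1) - Opre A (k + 1) := by
  by_cases hp : k % 2 = 0 <;> simp [sgn, hp, Epre_succ, Opre_succ] <;> ring

-- B's first loop: signed total
theorem altLoopT (A : List Int) :
    ∀ m k, k + m = A.length →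
      (A.drop k).foldl altStepT (Epre A k - Opre A k, sgn k)
        = (Epre A A.length - Opre A A.length, sgn A.length) := by
  intro m
  induction m with
  | zero => intro k hk; rw [show k = A.length by omega]; simp
  | succ m ih =>
    intro k hk
    have hkn : k < A.length := by omega
    rw [List.drop_eq_getElem_cons hkn, List.foldl_cons]
    have hg : A[k] = A.getD k 0 := (List.getD_eq_getElem A 0 hkn).symm
    have hs : altStepT (Epre A k - Opre A k, sgn k) A[k]
        = (Epre A (k + 1) - Opre A (k + 1), sgn (k + 1)) := by
      simp only [altStepT]
      rw [hg, sgn_sum, sgn_succ]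
    rw [hs]
    exact ih (k + 1) (by omega)

-- B's second loop: counts Qs over the remaining indices
theorem altLoopC (A : List Int) (T : Int) :
    ∀ m k (c : Int), k + m = A.length →
      (A.drop k).foldl (altStepC T) (c, Epre A k - Opre A k, sgn k)
        = (c + (((List.range' k m).countP (Qs A T) : Nat) : Int),
           Epre A A.length - Opre A A.length, sgn A.length) := by
  intro m
  induction m with
  | zero => intro k c hk; rw [show k = A.length by omega]; simp
  | succ m ih =>
    intro k c hk
    have hkn : k < A.length := by omega
    rw [List.drop_eq_getElem_cons hkn, List.foldl_cons, List.range'_succ]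
    have hg : A[k] = A.getD k 0 := (List.getD_eq_getElem A 0 hkn).symm
    have hP : altStepC T (c, Epre A k - Opre A k, sgn k) A[k]
        = ((if Qs A T k then c + 1 else c), Epre A (k + 1) - Opre A (k + 1), sgn (k + 1)) := by
      by_cases hc : 2 * (Epre A k - Opre A k) + sgn k * A.getD k 0 = T <;>
        simp [altStepC, Qs, hc, hg, sgn_sum, sgn_succ] <;>
        simp [← List.getD_eq_getElem?_getD, sgn_sum]
    rw [hP, ih (k + 1) _ (by omega)]
    by_cases hq : Qs A T k = true <;>
      simp [List.countP_cons, hq] <;> ring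

theorem loop1 (A : List Int) (h2 : 2 ≤ A.length) :
    ∀ m, m < A.length →
    (let st := (PySem.List.pyRange 1 ((m + 1 : Nat) : Int) 1).foldl (solveStep1 A)
        ((List.replicate A.length (0 : Int)).set 0 (A.getD 0 0),
         (List.replicate A.length (0 : Int)).set 1 (A.getD 1 0));
     st.1.length = A.length ∧ st.2.length = A.length ∧
       ∀ k, k ≤ m → st.1.getD k 0 = Epre A (k + 1) ∧ st.2.getD k 0 = Opre A (k + 1)) := by
  intro m
  induction m with
  | zero =>
    intro hm
    rw [show ((0 + 1 : Nat) : Int) = 1 by norm_num, PySem.List.pyRange_one_eq_nil (by omega)]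
    simp only [List.foldl_nil]
    refine ⟨by simp, by simp, ?_⟩
    intro k hk
    interval_cases k
    constructor
    · simp [List.getD_eq_getElem?_getD, List.getElem?_set_self, Epre, show 0 < A.length by omega]
    · simp [List.getD_eq_getElem?_getD, List.getElem?_set_ne, Opre,
        show 0 < A.length by omega]
  | succ m ih =>
    intro hm
    have ih' := ih (by omega)
    simp only at ih' ⊢
    rw [show ((m + 1 + 1 : Nat) : Int) = ((m + 1 : Nat) : Int) + 1 by push_cast; ring,
      PySem.List.pyRange_one_succ_right (by omega), List.foldl_append, List.foldl_cons,
      List.foldl_nil]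
    obtain ⟨hl1, hl2, hch⟩ := ih'
    set st := (PySem.List.pyRange 1 ((m + 1 : Nat) : Int) 1).foldl (solveStep1 A)
        ((List.replicate A.length (0 : Int)).set 0 (A.getD 0 0),
         (List.replicate A.length (0 : Int)).set 1 (A.getD 1 0)) with hst
    have hchm1 : st.1[m]?.getD 0 = Epre A (m + 1) := by
      simpa [List.getD_eq_getElem?_getD] using (hch m le_rfl).1
    have hchm2 : st.2[m]?.getD 0 = Opre A (m + 1) := by
      simpa [List.getD_eq_getElem?_getD] using (hch m le_rfl).2
    have hsub : ((m + 1 : Nat) : Int) - 1 = (m : Nat) := by push_cast; ring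
    by_cases hp : (m + 1) % 2 = 0
    · have hm2 : m % 2 = 1 := by omega
      rw [solveStep1, if_pos (by simp; omega)]
      refine ⟨by simp [hl1], by simp [hl2], ?_⟩
      intro k hk
      rw [hsub]
      simp only [PySem.List.pySetD_natCast, PySem.List.pyGetD_natCast]
      by_cases hkm : k = m + 1
      · subst hkm
        refine ⟨?_, ?_⟩ <;>
          simp [List.getD_eq_getElem?_getD,
            List.getElem?_set_self (show m + 1 < st.1.length by omega),
            List.getElem?_set_self (show m + 1 < st.2.length by omega),
            hchm1, hchm2, Epre_succ, Opre_succ, hp, hm2] <;> omega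
      · have hk' : k ≤ m := by omega
        refine ⟨?_, ?_⟩
        · simpa [List.getD_eq_getElem?_getD, List.getElem?_set_ne (by omega : ¬ m + 1 = k)]
            using (hch k hk').1
        · simpa [List.getD_eq_getElem?_getD, List.getElem?_set_ne (by omega : ¬ m + 1 = k)]
            using (hch k hk').2
    · have hm2 : m % 2 = 0 := by omega
      rw [solveStep1, if_neg (by simp; omega)]
      refine ⟨by simp [hl1], by simp [hl2], ?_⟩
      intro k hk
      rw [hsub]
      simp only [PySem.List.pySetD_natCast, PySem.List.pyGetD_natCast]
      by_cases hkm : k = m + 1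
      · subst hkm
        refine ⟨?_, ?_⟩ <;>
          simp [List.getD_eq_getElem?_getD,
            List.getElem?_set_self (show m + 1 < st.1.length by omega),
            List.getElem?_set_self (show m + 1 < st.2.length by omega),
            hchm1, hchm2, Epre_succ, Opre_succ, show ¬ (m + 1) % 2 = 0 from hp, hm2] <;> omega
      · have hk' : k ≤ m := by omega
        refine ⟨?_, ?_⟩
        · simpa [List.getD_eq_getElem?_getD, List.getElem?_set_ne (by omega : ¬ m + 1 = k)]
            using (hch k hk').1
        · simpa [List.getD_eq_getElem?_getD, List.getElem?_set_ne (by omega : ¬ m + 1 = k)]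
            using (hch k hk').2

theorem solveStep2_zero (pe po : List Int) (n c : Int) :
    solveStep2 pe po n c 0 =
      if PySem.List.pyGetD pe (n - 1) 0 - PySem.List.pyGetD pe 0 0
          = PySem.List.pyGetD po (n - 1) 0 - PySem.List.pyGetD po 0 0
      then c + 1 else c := by
  simp [solveStep2]

theorem solveStep2_ne (pe po : List Int) (n c i : Int) (hi : i ≠ 0) :
    solveStep2 pe po n c i =
      if PySem.List.pyGetD pe (n - 1) 0 - PySem.List.pyGetD pe i 0 + PySem.List.pyGetD po (i - 1) 0
          = PySem.List.pyGetD po (n - 1) 0 - PySem.List.pyGetD po i 0 + PySem.List.pyGetD pe (i - 1) 0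
      then c + 1 else c := by
  simp [solveStep2, hi]

theorem loop2 (A : List Int) (pe po : List Int) (h2 : 2 ≤ A.length)
    (hch : ∀ k, k < A.length → pe.getD k 0 = Epre A (k + 1) ∧ po.getD k 0 = Opre A (k + 1)) :
    ∀ m, m ≤ A.length →
    ((List.range m).map (fun (k : Nat) => (k : Int))).foldl
        (solveStep2 pe po (A.length : Int)) 0 = (((List.range m).countP (Qa A) : Nat) : Int) := by
  intro m
  induction m with
  | zero => simp
  | succ m ih =>
    intro hm
    have ih' := ih (by omega)
    rw [List.range_succ, List.map_append, List.foldl_append, ih', List.countP_append,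
      List.map_singleton, List.foldl_cons, List.foldl_nil]
    have hn1 : (A.length : Int) - 1 = ((A.length - 1 : Nat) : Int) := by omega
    have hpon : po.getD (A.length - 1) 0 = Opre A A.length := by
      have := (hch (A.length - 1) (by omega)).2
      rwa [Nat.sub_add_cancel (by omega)] at this
    have hpen : pe.getD (A.length - 1) 0 = Epre A A.length := by
      have := (hch (A.length - 1) (by omega)).1
      rwa [Nat.sub_add_cancel (by omega)] at this
    by_cases h0 : m = 0
    · subst h0
      rw [show ((0 : Nat) : Int) = 0 by norm_num, solveStep2_zero]
      simp only [hn1, PySem.List.pyGetD_natCast, hpon, hpen]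
      simp only [PySem.List.pyGetD_zero]
      simp only [(hch 0 (by omega)).1, (hch 0 (by omega)).2]
      have hq : Qa A 0 = decide (Epre A A.length - Epre A 1 = Opre A A.length - Opre A 1) := by
        simp [Qa]
      by_cases hcond : Epre A A.length - Epre A 1 = Opre A A.length - Opre A 1
      · rw [if_pos hcond, List.countP_cons_of_pos (by simp [hq, hcond])]
        simp [List.countP_nil]
      · rw [if_neg hcond, List.countP_cons_of_neg (by simp [hq, hcond])]
        simp
    · rw [solveStep2_ne _ _ _ _ _ (by exact_mod_cast h0)]
      have hm1 : ((m : Nat) : Int) - 1 = ((m - 1 : Nat) : Int) := by omega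
      simp only [hn1, hm1, PySem.List.pyGetD_natCast, hpon, hpen]
      have he : pe.getD (m - 1) 0 = Epre A m := by
        have := (hch (m - 1) (by omega)).1
        rwa [Nat.sub_add_cancel (by omega)] at this
      have ho : po.getD (m - 1) 0 = Opre A m := by
        have := (hch (m - 1) (by omega)).2
        rwa [Nat.sub_add_cancel (by omega)] at this
      simp only [(hch m (by omega)).1, (hch m (by omega)).2, he, ho]
      have hq : Qa A m = decide (Epre A A.length - Epre A (m + 1) + Opre A m
          = Opre A A.length - Opre A (m + 1) + Epre A m) := by simp [Qa, h0]
      by_cases hcond : Epre A A.length - Epre A (m + 1) + Opre A m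
          = Opre A A.length - Opre A (m + 1) + Epre A m
      · rw [if_pos hcond, List.countP_cons_of_pos (by simp [hq, hcond])]
        simp [List.countP_nil]
      · rw [if_neg hcond, List.countP_cons_of_neg (by simp [hq, hcond])]
        simp

-- ===== VERDICT (by name: the statement is the Claim_ definition above) =====
theorem solve_spec : Claim_equal_solve := by
  intro A _
  unfold Spec_solve solve solve_alt
  simp only [PySem.List.len_eq]
  by_cases h : (A.length : Int) < 2
  · simp [h]
  · have h2 : 2 ≤ A.length := by omega
    rw [if_neg h, if_neg h]
    simp only [castRange, Int.toNat_natCast, PySem.List.pyGetD_zero]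
    -- B side
    have hT : (A.foldl altStepT (0, 1)).1 = Epre A A.length - Opre A A.length := by
      have := altLoopT A A.length 0 (by omega)
      simp only [List.drop_zero, Epre_zero, Opre_zero, sgn] at this
      norm_num at this
      simp [this]
    have hB : (A.foldl (altStepC ((A.foldl altStepT (0, 1)).1)) (0, 0, 1)).1
        = (((List.range' 0 A.length).countP
            (Qs A (Epre A A.length - Opre A A.length)) : Nat) : Int) := by
      have := altLoopC A (Epre A A.length - Opre A A.length) A.length 0 0 (by omega)
      simp only [List.drop_zero, Epre_zero, Opre_zero, sgn] at this
      norm_num at this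
      rw [hT, this]
    rw [hB]
    -- A side
    have hinit1 : PySem.List.pySetD (List.replicate A.length (0 : Int)) 0 (A.getD 0 0)
        = (List.replicate A.length (0 : Int)).set 0 (A.getD 0 0) := by
      simp [PySem.List.pySetD_of_nonneg]
    have hinit2 : PySem.List.pySetD (List.replicate A.length (0 : Int)) 1
          (PySem.List.pyGetD A 1 0)
        = (List.replicate A.length (0 : Int)).set 1 (A.getD 1 0) := by
      have hA1 : PySem.List.pyGetD A 1 0 = A.getD 1 0 := by
        match A, h2 with
        | a :: b :: t, _ => simp [PySem.List.pyGetD, PySem.List.pyGet?, PySem.List.pyIdx?]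
      simp [PySem.List.pySetD_of_nonneg, hA1]
    rw [hinit1, hinit2]
    set st := (PySem.List.pyRange 1 ((A.length : Nat) : Int) 1).foldl (solveStep1 A)
        ((List.replicate A.length (0 : Int)).set 0 (A.getD 0 0),
         (List.replicate A.length (0 : Int)).set 1 (A.getD 1 0)) with hst
    have hl := loop1 A h2 (A.length - 1) (by omega)
    rw [Nat.sub_add_cancel (by omega)] at hl
    simp only at hl
    rw [← hst] at hl
    rw [loop2 A st.1 st.2 h2 (fun k hk => hl.2.2 k (by omega)) A.length le_rfl]
    rw [← List.range_eq_range']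
    norm_cast
    exact List.countP_congr (fun k hk => by rw [Qa_eq_Qs])
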